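-- pv_equiv track=rewrite | github.com/ejvlf/adventofcode2021 | day18.py | gen_flatlist
-- ===== SOURCE A (Python) =====
-- def gen_flatlist(puzzle : list) -> list:
--   flatlist = []
--
--   for line in puzzle:
--     flatline, depth = [], 0
--     for c in line:
--
--       if c == '[':
--           depth += 1
--       elif c == ']':
--           depth -= 1
--       elif c.isdigit():  flatline.append([int(c), depth])
--
--     flatlist.append(flatline)
--
--   return flatlist
-- ===== SOURCE B (Python) =====
-- def gen_flatlist(puzzle: list) -> list:
--     flatlist = []
--     for line in puzzle:
--         # phase 1: bracket-depth table (inclusive prefix sum of contributions)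
--         contrib = [1 if c == '[' else (-1 if c == ']' else 0) for c in line]
--         depths = []
--         d = 0
--         for x in contrib:
--             d += x
--             depths.append(d)
--         # phase 2: keep digits with their depth (digits contribute 0, so
--         # inclusive depth at a digit equals the running depth there)
--         flatlist.append([[int(c), dep] for c, dep in zip(line, depths) if c.isdigit()])
--     return flatlist
-- ===== Notes on version B (the rewrite author's own statement) =====
-- stated objective: alternative
-- what changed: B replaces A's single stateful scan (mutating a depth counter and appending inside one loop) by a two-phase pipeline per line: first a depth table via an inclusive prefix sum of per-character bracket contributions, then a filter/map over characters zipped with their depths.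
import Mathlib
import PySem

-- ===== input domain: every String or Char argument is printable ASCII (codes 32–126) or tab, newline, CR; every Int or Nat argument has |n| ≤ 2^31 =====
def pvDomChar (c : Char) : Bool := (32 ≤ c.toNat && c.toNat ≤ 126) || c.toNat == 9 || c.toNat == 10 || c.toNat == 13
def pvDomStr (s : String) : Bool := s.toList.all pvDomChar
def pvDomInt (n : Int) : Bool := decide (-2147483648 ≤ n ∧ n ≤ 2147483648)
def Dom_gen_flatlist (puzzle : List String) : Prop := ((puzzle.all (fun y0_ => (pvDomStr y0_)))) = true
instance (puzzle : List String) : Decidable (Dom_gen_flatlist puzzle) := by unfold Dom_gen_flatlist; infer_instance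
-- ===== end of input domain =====

-- B replaces A's single stateful scan per line by a two-phase pipeline (depth table by
-- inclusive prefix sum, then filter/map over char-depth pairs); same result, same cost.


-- ===== PORT A =====
-- int(c) for a digit character c is its ASCII value minus 48 (exact for digits '0'–'9').
def gen_flatlist (puzzle : List String) : List (List (List Int)) :=
  puzzle.foldl (fun flatlist line =>
    let st := line.toList.foldl (fun (p : List (List Int) × Int) c =>
      if c = '[' then (p.1, p.2 + 1)
      else if c = ']' then (p.1, p.2 - 1)
      else if PySem.Chars.isdigit c then (p.1 ++ [[(c.toNat : Int) - 48, p.2]], p.2)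
      else p) ([], 0)
    flatlist ++ [st.1]) []

-- ===== PORT B =====
def gen_flatlist_alt (puzzle : List String) : List (List (List Int)) :=
  puzzle.map (fun line =>
    let cs := line.toList
    let contrib := cs.map (fun c => if c = '[' then (1 : Int) else if c = ']' then -1 else 0)
    let depths := (contrib.foldl (fun (p : List Int × Int) x => (p.1 ++ [p.2 + x], p.2 + x)) ([], 0)).1
    ((cs.zip depths).filter (fun p => PySem.Chars.isdigit p.1)).map
      (fun p => [(p.1.toNat : Int) - 48, p.2]))

-- ===== PRECONDITION & SPEC =====
def Spec_gen_flatlist (puzzle : List String) (out : List (List (List Int))) : Prop := out = gen_flatlist_alt puzzle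
instance (puzzle : List String) (out : List (List (List Int))) : Decidable (Spec_gen_flatlist puzzle out) := by unfold Spec_gen_flatlist; infer_instance

-- ===== CLAIM (what is proved, stated in full; the proofs are below) =====
def Claim_equal_gen_flatlist : Prop := ∀ (puzzle : List String), Dom_gen_flatlist puzzle → Spec_gen_flatlist puzzle (gen_flatlist puzzle)

-- ===== LEMMAS AND PROOFS =====

-- the common recursive specification of one line's result, starting at depth d
def pvLineSpec (cs : List Char) (d : Int) : List (List Int) :=
  match cs with
  | [] => []
  | c :: t =>
    if c = '[' then pvLineSpec t (d + 1)
    else if c = ']' then pvLineSpec t (d - 1)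
    else if PySem.Chars.isdigit c then [(c.toNat : Int) - 48, d] :: pvLineSpec t d
    else pvLineSpec t d

-- A's inner fold computes acc ++ pvLineSpec
theorem pvA_inner (cs : List Char) (acc : List (List Int)) (d : Int) :
    (cs.foldl (fun (p : List (List Int) × Int) c =>
      if c = '[' then (p.1, p.2 + 1)
      else if c = ']' then (p.1, p.2 - 1)
      else if PySem.Chars.isdigit c then (p.1 ++ [[(c.toNat : Int) - 48, p.2]], p.2)
      else p) (acc, d)).1 = acc ++ pvLineSpec cs d := by
  induction cs generalizing acc d with
  | nil => simp [pvLineSpec]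
  | cons c t ih =>
    simp only [List.foldl_cons, pvLineSpec]
    by_cases h1 : c = '['
    · simp [h1, ih]
    · by_cases h2 : c = ']'
      · simp [h2, ih]
      · by_cases h3 : PySem.Chars.isdigit c
        · simp [h1, h2, h3, ih]
        · simp [h1, h2, h3, ih]

-- B's recursive depth table starting at d
def pvDepths (cs : List Char) (d : Int) : List Int :=
  match cs with
  | [] => []
  | c :: t =>
    let d' := d + (if c = '[' then (1 : Int) else if c = ']' then -1 else 0)
    d' :: pvDepths t d'

-- B's fold over the contribution list computes acc ++ pvDepths
theorem pvB_depths (cs : List Char) (acc : List Int) (d : Int) :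
    ((cs.map (fun c => if c = '[' then (1 : Int) else if c = ']' then -1 else 0)).foldl
      (fun (p : List Int × Int) x => (p.1 ++ [p.2 + x], p.2 + x)) (acc, d)).1
    = acc ++ pvDepths cs d := by
  induction cs generalizing acc d with
  | nil => simp [pvDepths]
  | cons c t ih => simp [pvDepths, ih]

-- B's filter/map phase over the depth table equals the recursive spec
theorem pvB_zip (cs : List Char) (d : Int) :
    ((cs.zip (pvDepths cs d)).filter (fun p => PySem.Chars.isdigit p.1)).map
      (fun p => [(p.1.toNat : Int) - 48, p.2]) = pvLineSpec cs d := by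
  induction cs generalizing d with
  | nil => simp [pvDepths, pvLineSpec]
  | cons c t ih =>
    simp only [pvDepths, pvLineSpec, List.zip_cons_cons]
    by_cases h1 : c = '['
    · simp [h1, show PySem.Chars.isdigit '[' = false from by decide, ih]
    · by_cases h2 : c = ']'
      · subst h2
        simp [show PySem.Chars.isdigit ']' = false from by decide,
          show d + -1 = d - 1 from by ring, ih]
      · by_cases h3 : PySem.Chars.isdigit c
        · simp [h1, h2, h3, ih]
        · simp [h1, h2, h3, ih]

-- A's outer fold-with-append is a map
theorem pvA_outer (xs : List String) (acc : List (List (List Int)))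
    (f : String → List (List Int)) :
    xs.foldl (fun a line => a ++ [f line]) acc = acc ++ xs.map f := by
  induction xs generalizing acc with
  | nil => simp
  | cons x t ih => simp [ih]

-- ===== VERDICT (by name: the statement is the Claim_ definition above) =====
theorem gen_flatlist_spec : Claim_equal_gen_flatlist := by
  intro puzzle _
  unfold Spec_gen_flatlist gen_flatlist gen_flatlist_alt
  rw [pvA_outer puzzle []
    (fun line => (line.toList.foldl (fun (p : List (List Int) × Int) c =>
      if c = '[' then (p.1, p.2 + 1)
      else if c = ']' then (p.1, p.2 - 1)
      else if PySem.Chars.isdigit c then (p.1 ++ [[(c.toNat : Int) - 48, p.2]], p.2)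
      else p) ([], 0)).1)]
  simp only [List.nil_append]
  apply List.map_congr_left
  intro line _
  rw [pvA_inner, pvB_depths]
  simp only [List.nil_append]
  rw [pvB_zip]
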